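-- pv_equiv track=rewrite | github.com/Pauljdproject/Gensim_Text_Processing_LDa | Cleaning_email_body_updated_JD.py | Remove_text_htm_end
-- ===== SOURCE A (Python) =====
-- def Remove_text_htm_end(text):
--     text_body =  str(text).split(" ")
--     text_list = []
--     for text in text_body:
--
--         if str(text).endswith(".htm"):
--             text_list.append(" ")
--         elif str(text).endswith(".com"):
--             text_list.append(" ")
--
--         elif str(text).endswith(".html"):
--             text_list.append(" ")
--
--
--         else:
--             text_list.append(text)
--
--     return str(" ".join(text_list))
-- ===== SOURCE B (Python) =====
-- def _flush(tok):
--     t = ''.join(tok)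
--     if t.endswith('.htm') or t.endswith('.com') or t.endswith('.html'):
--         return ' '
--     return t
--
-- def Remove_text_htm_end(text):
--     # single pass over the characters: accumulate the current space-free token,
--     # flush it (replaced by ' ' if it ends in .htm/.com/.html) at each space and at the end
--     s = str(text)
--     out = []
--     tok = []
--     for ch in s:
--         if ch == ' ':
--             out.append(_flush(tok))
--             out.append(' ')
--             tok = []
--         else:
--             tok.append(ch)
--     out.append(_flush(tok))
--     return ''.join(out)
-- ===== Notes on version B (the rewrite author's own statement) =====
-- stated objective: alternative
-- what changed: Replaces A's split-on-space / per-token loop / join pipeline by a single character-level scan with a token accumulator that emits each flushed token (or a space) directly, never materialising the token list.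
import Mathlib
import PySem

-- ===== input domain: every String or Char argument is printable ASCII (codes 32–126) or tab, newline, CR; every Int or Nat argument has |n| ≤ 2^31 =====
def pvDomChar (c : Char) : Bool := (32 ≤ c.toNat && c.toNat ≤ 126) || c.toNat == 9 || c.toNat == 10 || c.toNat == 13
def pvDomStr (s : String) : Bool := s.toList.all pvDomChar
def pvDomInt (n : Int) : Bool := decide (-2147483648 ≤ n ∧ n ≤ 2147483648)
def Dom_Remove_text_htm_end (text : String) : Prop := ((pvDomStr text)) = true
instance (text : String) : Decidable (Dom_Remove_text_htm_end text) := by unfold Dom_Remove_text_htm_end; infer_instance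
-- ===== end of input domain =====

-- B replaces A's split/per-token-loop/join pipeline by a single character-level scan
-- with a token accumulator (alternative decomposition, same cost).


-- ===== PORT A =====
-- str(text).split(" "): sep is nonempty, so Python split = Chars.splitOn on the code points
def Remove_text_htm_end (text : String) : String :=
  let text_body := (PySem.Chars.splitOn text.toList [' ']).map String.ofList
  let text_list := text_body.foldl (fun acc t =>
    if PySem.Str.endswith t ".htm" then acc ++ [" "]
    else if PySem.Str.endswith t ".com" then acc ++ [" "]
    else if PySem.Str.endswith t ".html" then acc ++ [" "]
    else acc ++ [t]) []
  PySem.Str.join " " text_list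

-- ===== PORT B =====
-- _flush(tok) of Source B
def pvFlush (tok : List Char) : List Char :=
  if PySem.Chars.endswith tok ".htm".toList || PySem.Chars.endswith tok ".com".toList
      || PySem.Chars.endswith tok ".html".toList then [' '] else tok

-- Source B's for-loop over the characters: tok is the current token accumulator,
-- the emitted pieces are concatenated as Source B's final ''.join does
def pvAltGo (tok : List Char) : List Char → List Char
  | [] => pvFlush tok
  | c :: rest => if c = ' ' then pvFlush tok ++ ' ' :: pvAltGo [] rest
                 else pvAltGo (tok ++ [c]) rest

def Remove_text_htm_end_alt (text : String) : String :=
  String.ofList (pvAltGo [] text.toList)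

-- ===== PRECONDITION & SPEC =====
def Spec_Remove_text_htm_end (text : String) (out : String) : Prop := out = Remove_text_htm_end_alt text
instance (text : String) (out : String) : Decidable (Spec_Remove_text_htm_end text out) := by unfold Spec_Remove_text_htm_end; infer_instance

-- ===== CLAIM (what is proved, stated in full; the proofs are below) =====
def Claim_equal_Remove_text_htm_end : Prop := ∀ (text : String), Dom_Remove_text_htm_end text → Spec_Remove_text_htm_end text (Remove_text_htm_end text)

-- ===== LEMMAS AND PROOFS =====

-- reference splitter: Python's split(" ") as structural recursion
def pvSplitSp : List Char → List (List Char)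
  | [] => [[]]
  | c :: rest =>
    if c = ' ' then [] :: pvSplitSp rest
    else match pvSplitSp rest with
      | [] => [[c]]
      | t :: ts => (c :: t) :: ts

def pvPrep (p : List Char) : List (List Char) → List (List Char)
  | [] => [p]
  | t :: ts => (p ++ t) :: ts

theorem pvSplitSp_ne_nil (l : List Char) : pvSplitSp l ≠ [] := by
  cases l with
  | nil => simp [pvSplitSp]
  | cons c rest =>
    simp only [pvSplitSp]
    split
    · simp
    · split <;> simp_all

theorem pvPrep_prep (a b : List Char) (l : List (List Char)) :
    pvPrep a (pvPrep b l) = pvPrep (a ++ b) l := by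
  cases l <;> simp [pvPrep]

theorem splitOn_go_eq (fuel : Nat) (l cur : List Char) (acc : List (List Char))
    (h : l.length < fuel) :
    PySem.Chars.splitOn.go [' '] fuel l cur acc
      = acc.reverse ++ pvPrep cur.reverse (pvSplitSp l) := by
  induction fuel generalizing l cur acc with
  | zero => omega
  | succ fuel ih =>
    rw [PySem.Chars.splitOn.go.eq_def]
    cases l with
    | nil => simp [pvSplitSp, pvPrep]
    | cons c rest =>
      simp only []
      by_cases hc : c = ' '
      · subst hc
        have hpre : [' '].isPrefixOf (' ' :: rest) = true := by simp [List.isPrefixOf]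
        rw [if_pos hpre]
        rw [show List.drop [' '].length (' ' :: rest) = rest from rfl]
        rw [ih rest [] (cur.reverse :: acc) (by simpa using Nat.lt_of_succ_lt_succ h)]
        simp only [pvSplitSp, pvPrep, List.reverse_nil]
        cases hs : pvSplitSp rest with
        | nil => exact absurd hs (pvSplitSp_ne_nil rest)
        | cons t ts => simp
      · have hpre : [' '].isPrefixOf (c :: rest) = false := by
          simp only [List.isPrefixOf, Bool.and_true, beq_eq_false_iff_ne, ne_eq]
          exact fun h => hc h.symm
        rw [if_neg (by simp [hpre])]
        rw [ih rest (c :: cur) acc (by simpa using Nat.lt_of_succ_lt_succ h)]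
        have : pvSplitSp (c :: rest) = pvPrep [c] (pvSplitSp rest) := by
          simp only [pvSplitSp, if_neg hc]
          cases hs : pvSplitSp rest with
          | nil => exact absurd hs (pvSplitSp_ne_nil rest)
          | cons t ts => simp [pvPrep]
        rw [this, List.reverse_cons, ← pvPrep_prep]

theorem splitOn_eq (l : List Char) :
    PySem.Chars.splitOn l [' '] = pvSplitSp l := by
  rw [PySem.Chars.splitOn, splitOn_go_eq l.length.succ l [] [] (Nat.lt_succ_self _)]
  cases hs : pvSplitSp l with
  | nil => exact absurd hs (pvSplitSp_ne_nil l)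
  | cons t ts => simp [pvPrep]

theorem join_cons (t : List Char) (ts : List (List Char)) (h : ts ≠ []) :
    PySem.Chars.join [' '] (t :: ts) = t ++ ' ' :: PySem.Chars.join [' '] ts := by
  cases ts with
  | nil => exact absurd rfl h
  | cons u us => simp [PySem.Chars.join, List.intercalate]

theorem pvAltGo_eq (l tok : List Char) :
    pvAltGo tok l = PySem.Chars.join [' '] ((pvPrep tok (pvSplitSp l)).map pvFlush) := by
  induction l generalizing tok with
  | nil => simp [pvAltGo, pvSplitSp, pvPrep, PySem.Chars.join, List.intercalate]
  | cons c rest ih =>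
    by_cases hc : c = ' '
    · subst hc
      have hne : pvSplitSp rest ≠ [] := pvSplitSp_ne_nil rest
      have hprep : pvPrep [] (pvSplitSp rest) = pvSplitSp rest := by
        cases hs : pvSplitSp rest with
        | nil => exact absurd hs hne
        | cons t ts => simp [pvPrep]
      have h1 : pvAltGo tok (' ' :: rest) = pvFlush tok ++ ' ' :: pvAltGo [] rest := by
        simp [pvAltGo]
      have h2 : pvSplitSp (' ' :: rest) = [] :: pvSplitSp rest := by simp [pvSplitSp]
      have h3 : pvPrep tok ([] :: pvSplitSp rest) = tok :: pvSplitSp rest := by simp [pvPrep]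
      rw [h1, h2, h3, List.map_cons, join_cons _ _ (by simp [hne]), ih [], hprep]
    · have hsplit : pvSplitSp (c :: rest) = pvPrep [c] (pvSplitSp rest) := by
        simp only [pvSplitSp, if_neg hc]
        cases hs : pvSplitSp rest with
        | nil => exact absurd hs (pvSplitSp_ne_nil rest)
        | cons t ts => simp [pvPrep]
      simp only [pvAltGo, if_neg hc]
      rw [ih (tok ++ [c]), hsplit, pvPrep_prep]

theorem foldl_A (xs : List String) (acc : List String) :
    xs.foldl (fun acc t =>
        if PySem.Str.endswith t ".htm" then acc ++ [" "]
        else if PySem.Str.endswith t ".com" then acc ++ [" "]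
        else if PySem.Str.endswith t ".html" then acc ++ [" "]
        else acc ++ [t]) acc
      = acc ++ xs.map (fun t =>
          if PySem.Str.endswith t ".htm" then " "
          else if PySem.Str.endswith t ".com" then " "
          else if PySem.Str.endswith t ".html" then " " else t) := by
  induction xs generalizing acc with
  | nil => simp
  | cons x xs ih =>
    simp only [List.foldl_cons, List.map_cons]
    split_ifs <;> rw [ih] <;> simp

theorem g_ofList (t : List Char) :
    (fun t : String =>
        if PySem.Str.endswith t ".htm" then " "
        else if PySem.Str.endswith t ".com" then " "
        else if PySem.Str.endswith t ".html" then " " else t) (String.ofList t)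
      = String.ofList (pvFlush t) := by
  simp only [PySem.Str.endswith, String.toList_ofList, pvFlush]
  cases h1 : PySem.Chars.endswith t ".htm".toList <;>
    cases h2 : PySem.Chars.endswith t ".com".toList <;>
      cases h3 : PySem.Chars.endswith t ".html".toList <;> simp

theorem join_ofList (ys : List (List Char)) :
    PySem.Str.join " " (ys.map String.ofList) = String.ofList (PySem.Chars.join [' '] ys) := by
  simp only [PySem.Str.join, List.map_map]
  congr 1
  congr 1
  calc List.map (String.toList ∘ String.ofList) ys
      = List.map id ys := List.map_congr_left (fun t _ => by simp)
    _ = ys := List.map_id ys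

-- ===== VERDICT (by name: the statement is the Claim_ definition above) =====
theorem Remove_text_htm_end_spec : Claim_equal_Remove_text_htm_end := by
  intro text _
  unfold Spec_Remove_text_htm_end Remove_text_htm_end Remove_text_htm_end_alt
  simp only [splitOn_eq]
  rw [pvAltGo_eq]
  have hprep : pvPrep [] (pvSplitSp text.toList) = pvSplitSp text.toList := by
    cases hs : pvSplitSp text.toList with
    | nil => exact absurd hs (pvSplitSp_ne_nil _)
    | cons t ts => simp [pvPrep]
  rw [hprep, foldl_A, List.nil_append, List.map_map]
  have : ((fun t : String =>
        if PySem.Str.endswith t ".htm" then " "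
        else if PySem.Str.endswith t ".com" then " "
        else if PySem.Str.endswith t ".html" then " " else t) ∘ String.ofList)
      = String.ofList ∘ pvFlush := by
    funext t
    exact g_ofList t
  rw [this, ← List.map_map, join_ofList]
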